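-- pv_equiv track=rewrite | github.com/chenxu0602/LeetCode | 2509.cycle-length-queries-in-a-tree.py | cycleLengthQueries
-- ===== SOURCE A (Python) =====
-- from typing import List
--
-- def cycleLengthQueries(n: int, queries: List[List[int]]) -> List[int]:
--
--     res = []
--     for x, y in queries:
--         res.append(1)
--         while x != y:
--             x, y = min(x, y), max(x, y) // 2
--             res[-1] += 1
--
--     return res
-- ===== SOURCE B (Python) =====
-- from typing import List
--
-- def cycleLengthQueries(n: int, queries: List[List[int]]) -> List[int]:
--     # Per query: answer by bit arithmetic on the node labels, no loop.
--     res = []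
--     for x, y in queries:
--         lx, ly = x.bit_length(), y.bit_length()
--         if lx < ly:
--             x, y, lx, ly = y, x, ly, lx
--         c = ly - ((x >> (lx - ly)) ^ y).bit_length()
--         res.append((lx - c) + (ly - c) + 1)
--     return res
-- ===== Notes on version B (the rewrite author's own statement) =====
-- stated objective: faster
-- what changed: Replaces A's per-query while loop (repeatedly halving the larger node until the two meet) with O(1) bit arithmetic per query: align the deeper node by right-shifting, XOR to find the common-prefix (common-ancestor) depth, and compute the cycle length in closed form.
import Mathlib
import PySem

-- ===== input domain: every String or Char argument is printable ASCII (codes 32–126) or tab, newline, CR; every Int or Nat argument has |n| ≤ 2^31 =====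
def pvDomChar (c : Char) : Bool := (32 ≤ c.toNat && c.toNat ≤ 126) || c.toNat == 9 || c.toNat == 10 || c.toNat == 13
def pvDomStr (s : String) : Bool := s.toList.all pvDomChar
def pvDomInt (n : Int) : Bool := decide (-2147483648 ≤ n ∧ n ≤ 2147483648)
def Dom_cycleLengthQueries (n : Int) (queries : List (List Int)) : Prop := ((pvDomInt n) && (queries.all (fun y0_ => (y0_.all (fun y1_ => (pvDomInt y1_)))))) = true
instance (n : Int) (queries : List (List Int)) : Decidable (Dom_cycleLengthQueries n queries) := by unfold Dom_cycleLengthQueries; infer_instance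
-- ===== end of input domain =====

-- B replaces A's per-query while loop by closed-form bit arithmetic on the two node
-- labels (align by shifting, XOR to find the common-prefix depth); per-query O(1).

-- ===== PORT A =====
-- A's while loop: the appended res[-1] counts 1 plus the number of iterations.
-- The `x < 0 ∨ y < 0` guard only makes the recursion total: on such inputs (excluded
-- by Pre_) Python's loop does not terminate unless x = y, which the first branch handles.
def pvLoopA (x y : Int) : Int :=
  if h1 : x = y then 1
  else if h2 : x < 0 ∨ y < 0 then 1
  else 1 + pvLoopA (min x y) (PySem.Int.floordiv (max x y) 2)
termination_by (max x y).toNat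
decreasing_by
  rw [PySem.Int.floordiv_eq_ediv_of_pos (by norm_num : (0:Int) < 2)]
  omega

def cycleLengthQueries (n : Int) (queries : List (List Int)) : List Int :=
  queries.foldl (fun res q =>
    match q with
    | [x, y] => res ++ [pvLoopA x y]
    | _ => res ++ [0]   -- Python raises ValueError while unpacking; outside Pre_
    ) []

-- ===== PORT B =====
-- shared tail of Source B's loop body after the conditional swap
def pvCalcB (x y : Int) : Int :=
  let lx := PySem.Int.bitLength x
  let ly := PySem.Int.bitLength y
  let c := ly - PySem.Int.bitLength (PySem.Int.bxor (x >>> (lx - ly)) y)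
  (((lx - c) + (ly - c) + 1 : Nat) : Int)

def pvQueryB (x y : Int) : Int :=
  if PySem.Int.bitLength x < PySem.Int.bitLength y then pvCalcB y x else pvCalcB x y

-- one loop step of Source B: unpack the row (a pair on Pre_) and append the closed-form answer
def pvRowB (res : List Int) (q : List Int) : List Int :=
  match q with
  | x :: t =>
    match t with
    | y :: rest => if rest.isEmpty then res ++ [pvQueryB x y] else res ++ [0]
    | [] => res ++ [0]   -- Python raises ValueError while unpacking; outside Pre_
  | [] => res ++ [0]

def cycleLengthQueries_alt (n : Int) (queries : List (List Int)) : List Int :=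
  queries.foldl pvRowB []

-- ===== PRECONDITION & SPEC =====
-- Pre_ admits exactly the queries Python A returns on: each row is a pair, with both
-- entries ≥ 0 (A terminates there) or equal (A returns immediately).  On a pair with a
-- negative entry and x ≠ y Python A loops forever, and on a row that is not a pair it
-- raises ValueError (unpacking).
def pvPreRow (q : List Int) : Bool :=
  decide (q.length = 2) &&
    (q.all (fun v => decide (0 ≤ v)) || decide (q.getD 0 0 = q.getD 1 0))

def Pre_cycleLengthQueries (n : Int) (queries : List (List Int)) : Prop :=
  queries.all pvPreRow = true
instance (n : Int) (queries : List (List Int)) : Decidable (Pre_cycleLengthQueries n queries) := by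
  unfold Pre_cycleLengthQueries; infer_instance

def pvWitness_cycleLengthQueries : Int × List (List Int) := (2, [[1, 5], [4, 4], [0, 7]])

def Spec_cycleLengthQueries (n : Int) (queries : List (List Int)) (out : List Int) : Prop := out = cycleLengthQueries_alt n queries
instance (n : Int) (queries : List (List Int)) (out : List Int) : Decidable (Spec_cycleLengthQueries n queries out) := by unfold Spec_cycleLengthQueries; infer_instance

-- ===== CLAIM (what is proved, stated in full; the proofs are below) =====
def Claim_equal_cycleLengthQueries : Prop := ∀ (n : Int) (queries : List (List Int)), Dom_cycleLengthQueries n queries → Pre_cycleLengthQueries n queries → Spec_cycleLengthQueries n queries (cycleLengthQueries n queries)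

-- ===== LEMMAS AND PROOFS =====

-- Nat-level view of Python's bit_length
def pvBL (m : Nat) : Nat := PySem.Int.bitLength (m : Int)

def pvC (x y : Nat) : Nat := pvBL y - pvBL ((x >>> (pvBL x - pvBL y)) ^^^ y)
def pvCalcN (x y : Nat) : Nat := (pvBL x - pvC x y) + (pvBL y - pvC x y) + 1
def pvQN (x y : Nat) : Nat := if pvBL x < pvBL y then pvCalcN y x else pvCalcN x y

lemma pvBL_zero : pvBL 0 = 0 := by simpa [pvBL] using PySem.Int.bitLength_zero

lemma pvBL_half (m : Nat) (h : 0 < m) : pvBL m = pvBL (m / 2) + 1 :=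
  PySem.Int.bitLength_natCast h

lemma pvBL_lt (m : Nat) : m < 2 ^ pvBL m := by
  simpa [pvBL] using PySem.Int.lt_two_pow_bitLength (m : Int)

lemma pvBL_ge (m : Nat) (h : m ≠ 0) : 2 ^ (pvBL m - 1) ≤ m := by
  simpa [pvBL] using PySem.Int.two_pow_bitLength_le (m : Int) (by exact_mod_cast h)

lemma pvBL_le_iff (m k : Nat) : pvBL m ≤ k ↔ m < 2 ^ k := by
  constructor
  · intro h
    exact lt_of_lt_of_le (pvBL_lt m) (Nat.pow_le_pow_right (by norm_num) h)
  · intro h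
    by_contra hlt
    push_neg at hlt
    have hm : m ≠ 0 := by
      rintro rfl
      simp [pvBL_zero] at hlt
    have h1 := pvBL_ge m hm
    have h2 : 2 ^ k ≤ 2 ^ (pvBL m - 1) := Nat.pow_le_pow_right (by norm_num) (by omega)
    omega

lemma pvBL_div2 (m : Nat) : pvBL (m / 2) = pvBL m - 1 := by
  rcases Nat.eq_zero_or_pos m with rfl | h
  · simp [pvBL_zero]
  · rw [pvBL_half m h]; omega

lemma pvBL_mono {a b : Nat} (h : a ≤ b) : pvBL a ≤ pvBL b :=
  (pvBL_le_iff a (pvBL b)).mpr (lt_of_le_of_lt h (pvBL_lt b))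

lemma pvBL_pos (m : Nat) (h : 0 < m) : 0 < pvBL m := by
  rw [pvBL_half m h]; omega

lemma pv_xor_div_two (a b : Nat) : (a ^^^ b) / 2 = a / 2 ^^^ b / 2 := by
  apply Nat.eq_of_testBit_eq
  intro i
  simp [Nat.testBit_div_two, Nat.testBit_xor]

lemma pv_div2_shiftRight (y k : Nat) : (y / 2) >>> k = y >>> (k + 1) := by
  simp only [Nat.shiftRight_eq_div_pow, Nat.div_div_eq_div_mul]
  congr 1
  ring

lemma pvQN_self (x : Nat) : pvQN x x = 1 := by
  simp [pvQN, pvCalcN, pvC, pvBL_zero]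

-- B's per-query formula satisfies the same recurrence as A's loop step (x < y case)
lemma pvQN_rec' (x y : Nat) (hxy : x < y) : pvQN x y = 1 + pvQN x (y / 2) := by
  have hy : y ≠ 0 := by omega
  have hb1 : 0 < pvBL y := pvBL_pos y (by omega)
  have hab : pvBL x ≤ pvBL y := pvBL_mono (by omega)
  have hhalf : pvBL (y / 2) = pvBL y - 1 := pvBL_div2 y
  rcases eq_or_lt_of_le hab with hEq | hLt
  · -- equal bit lengths
    have hd1 : 0 < pvBL (x ^^^ y) := pvBL_pos _ (by
      have : x ^^^ y ≠ 0 := by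
        intro h
        exact absurd (Nat.xor_eq_zero_iff.mp h) (by omega)
      omega)
    have hdb : pvBL (x ^^^ y) ≤ pvBL y := by
      rw [pvBL_le_iff]
      exact Nat.xor_lt_two_pow (hEq ▸ pvBL_lt x) (pvBL_lt y)
    have hxor2 : pvBL ((x ^^^ y) / 2) = pvBL (x ^^^ y) - 1 := pvBL_div2 _
    rw [pvQN, pvQN, if_neg (by omega), if_neg (by omega)]
    unfold pvCalcN pvC
    rw [hEq, Nat.sub_self, Nat.shiftRight_zero, hhalf]
    have e2 : pvBL y - (pvBL y - 1) = 1 := by omega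
    rw [e2, Nat.shiftRight_one, ← pv_xor_div_two, hxor2]
    omega
  · -- pvBL x < pvBL y
    rw [pvQN, if_pos hLt]
    rcases eq_or_lt_of_le (show pvBL x ≤ pvBL y - 1 by omega) with h2 | h2
    · -- equal bit lengths after halving y
      rw [pvQN, if_neg (by omega)]
      unfold pvCalcN pvC
      rw [hhalf]
      have e0 : pvBL x - (pvBL y - 1) = 0 := by omega
      have e1 : pvBL y - pvBL x = 1 := by omega
      rw [e0, Nat.shiftRight_zero, e1, Nat.shiftRight_one, Nat.xor_comm (y / 2) x]
      omega
    · -- y / 2 still has strictly more bits than x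
      rw [pvQN, if_pos (by omega)]
      unfold pvCalcN pvC
      rw [hhalf, pv_div2_shiftRight]
      have e1 : pvBL y - 1 - pvBL x + 1 = pvBL y - pvBL x := by omega
      rw [e1]
      omega

lemma pvQN_symm (x y : Nat) : pvQN x y = pvQN y x := by
  rcases lt_trichotomy (pvBL x) (pvBL y) with h | h | h
  · rw [pvQN, pvQN, if_pos h, if_neg (by omega)]
  · rw [pvQN, pvQN, if_neg (by omega), if_neg (by omega)]
    unfold pvCalcN pvC
    rw [h, Nat.sub_self]
    simp only [Nat.shiftRight_zero]
    rw [Nat.xor_comm x y]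
  · rw [pvQN, pvQN, if_neg (by omega), if_pos h]

lemma pvQN_rec (x y : Nat) (hxy : x ≠ y) :
    pvQN x y = 1 + pvQN (min x y) (max x y / 2) := by
  rcases lt_or_gt_of_ne hxy with h | h
  · rw [min_eq_left h.le, max_eq_right h.le]
    exact pvQN_rec' x y h
  · rw [min_eq_right h.le, max_eq_left h.le, pvQN_symm]
    exact pvQN_rec' y x h

lemma pvLoopA_self (x : Int) : pvLoopA x x = 1 := by
  rw [pvLoopA]; simp

lemma pvQueryB_self (x : Int) : pvQueryB x x = 1 := by
  simp [pvQueryB, pvCalcB, PySem.Int.bxor_self, PySem.Int.bitLength_zero]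

lemma pvQueryB_cast (x y : Nat) : pvQueryB (x : Int) (y : Int) = (pvQN x y : Int) := by
  have sh : ∀ (a : Nat) (k : Nat), ((a : Int) >>> k) = ((a >>> k : Nat) : Int) := fun a k => rfl
  simp only [pvQueryB, pvQN, pvCalcB, pvCalcN, pvC, pvBL, sh, PySem.Int.bxor_natCast]
  split <;> rfl

lemma pvLoop_eq_qN (x y : Nat) : pvLoopA (x : Int) (y : Int) = (pvQN x y : Int) := by
  have H : ∀ s, ∀ x y : Nat, x + y ≤ s → pvLoopA (x : Int) (y : Int) = (pvQN x y : Int) := by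
    intro s
    induction s with
    | zero =>
      intro x y h
      have hx : x = 0 := by omega
      have hy : y = 0 := by omega
      subst hx; subst hy
      rw [pvLoopA_self, pvQN_self]; rfl
    | succ s ih =>
      intro x y h
      by_cases hxy : x = y
      · subst hxy
        rw [pvLoopA_self, pvQN_self]; rfl
      · rw [pvLoopA]
        rw [dif_neg (by exact_mod_cast hxy), dif_neg (by push_neg; constructor <;> positivity)]
        have hmin : min (x : Int) (y : Int) = ((min x y : Nat) : Int) := by
          exact_mod_cast (Nat.cast_min (α := Int) x y).symm
        have hmax : max (x : Int) (y : Int) = ((max x y : Nat) : Int) := by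
          exact_mod_cast (Nat.cast_max (α := Int) x y).symm
        have hdiv : PySem.Int.floordiv ((max x y : Nat) : Int) 2 = ((max x y / 2 : Nat) : Int) := by
          exact_mod_cast PySem.Int.floordiv_natCast (max x y) 2
        rw [hmin, hmax, hdiv, ih (min x y) (max x y / 2) (by omega)]
        rw [pvQN_rec x y hxy]
        push_cast
        ring
  exact H (x + y) x y le_rfl

lemma pvQuery_eq (x y : Int) (h : (0 ≤ x ∧ 0 ≤ y) ∨ x = y) :
    pvLoopA x y = pvQueryB x y := by
  rcases h with ⟨hx, hy⟩ | h'
  · lift x to Nat using hx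
    lift y to Nat using hy
    rw [pvQueryB_cast, pvLoop_eq_qN]
  · subst h'
    rw [pvLoopA_self, pvQueryB_self]

lemma pvFold_eq (qs : List (List Int)) (h : qs.all pvPreRow = true) (acc : List Int) :
    qs.foldl (fun res q =>
      match q with
      | [x, y] => res ++ [pvLoopA x y]
      | _ => res ++ [0]) acc
    = qs.foldl pvRowB acc := by
  induction qs generalizing acc with
  | nil => rfl
  | cons q qs ih =>
    rw [List.all_cons, Bool.and_eq_true_iff] at h
    obtain ⟨hq, hrest⟩ := h
    match q with
    | [] => simp [pvPreRow] at hq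
    | [x] => simp [pvPreRow] at hq
    | (x :: y :: z :: t) => simp [pvPreRow] at hq
    | [x, y] =>
      simp only [List.foldl_cons]
      have hq' : (0 ≤ x ∧ 0 ≤ y) ∨ x = y := by
        simpa [pvPreRow, List.getD] using hq
      rw [show pvLoopA x y = pvQueryB x y from pvQuery_eq x y hq']
      exact ih hrest _

-- ===== VERDICT (by name: the statement is the Claim_ definition above) =====
theorem cycleLengthQueries_spec : Claim_equal_cycleLengthQueries := by
  intro n queries _ hpre
  unfold Spec_cycleLengthQueries cycleLengthQueries cycleLengthQueries_alt
  exact pvFold_eq queries hpre []
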